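-- pv_equiv track=rewrite | github.com/thjalmarsson/PathFinding | main.py | move_node
-- ===== SOURCE A (Python) =====
-- def move_node(maze, moves, row, col, symbol):
-- 	new_row = row
-- 	new_col = col
-- 	for move in moves:
-- 		if move == "U":
-- 			new_row = new_row - 1
-- 			if maze[new_row][new_col] != "F":
-- 				maze[new_row][new_col] = symbol
-- 		elif move == "R":
-- 			new_col = new_col + 1
-- 			if maze[new_row][new_col] != "F":
-- 				maze[new_row][new_col] = symbol
-- 		elif move == "L":
-- 			new_col = new_col - 1
-- 			if maze[new_row][new_col] != "F":
-- 				maze[new_row][new_col] = symbol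
-- 		elif move == "D":
-- 			new_row = new_row + 1
-- 			if maze[new_row][new_col] != "F":
-- 				maze[new_row][new_col] = symbol
-- 	return new_row, new_col
-- ===== SOURCE B (Python) =====
-- def move_node(maze, moves, row, col, symbol):
--     deltas = {"U": (-1, 0), "R": (0, 1), "L": (0, -1), "D": (1, 0)}
--     r, c = row, col
--     path = []
--     for mv in moves:
--         if mv in deltas:
--             dr, dc = deltas[mv]
--             r += dr
--             c += dc
--             path.append((r, c))
--     for pr, pc in path:
--         if maze[pr][pc] != "F":
--             maze[pr][pc] = symbol
--     return (path[-1] if path else (row, col))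
-- ===== Notes on version B (the rewrite author's own statement) =====
-- stated objective: alternative
-- what changed: A's single fused loop (branch per direction, marking as it goes) is split into a delta-table trajectory pass that records every visited coordinate, followed by a separate marking pass over that list; the return value is the last trajectory point.
import Mathlib
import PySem

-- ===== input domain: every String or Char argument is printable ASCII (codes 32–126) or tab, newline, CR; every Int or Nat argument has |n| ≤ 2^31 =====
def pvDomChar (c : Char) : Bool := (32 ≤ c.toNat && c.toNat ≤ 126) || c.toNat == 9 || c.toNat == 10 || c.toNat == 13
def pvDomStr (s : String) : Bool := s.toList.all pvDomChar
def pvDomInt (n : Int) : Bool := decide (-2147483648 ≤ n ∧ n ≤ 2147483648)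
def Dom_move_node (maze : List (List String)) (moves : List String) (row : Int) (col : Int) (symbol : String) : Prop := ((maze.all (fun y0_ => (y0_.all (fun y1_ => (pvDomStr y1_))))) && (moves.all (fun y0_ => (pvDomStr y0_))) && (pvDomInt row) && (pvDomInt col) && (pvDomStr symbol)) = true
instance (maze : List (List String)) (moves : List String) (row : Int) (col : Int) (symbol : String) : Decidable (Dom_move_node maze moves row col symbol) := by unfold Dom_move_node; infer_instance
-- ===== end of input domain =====

-- B splits A's fused move-and-mark loop into a delta-table trajectory pass plus a separate
-- marking pass over the recorded coordinates (alternative decomposition, same cost).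
-- Both A and B mutate the maze argument in place identically; the equivalence proved here
-- is about the RETURN value.


-- ===== PORT A =====
-- maze[r][c], Python index semantics (none = IndexError, excluded by Pre_)
def pyGetCell (m : List (List String)) (r c : Int) : Option String :=
  (PySem.List.pyGet? m r).bind (fun rw => PySem.List.pyGet? rw c)

-- maze[r][c] = v (exact where in range; no-op on the out-of-range indices Pre_ excludes,
-- where Python raises IndexError)
def pySetCell (m : List (List String)) (r c : Int) (v : String) : List (List String) :=
  match PySem.List.pyGet? m r with
  | none => m
  | some rw => PySem.List.pySetD m r (PySem.List.pySetD rw c v)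

-- one iteration of A's loop: branch per direction, mark unless the cell is "F"
def moveStepA (symbol : String) (st : List (List String) × Int × Int) (move : String) :
    List (List String) × Int × Int :=
  if move == "U" then
    let nr := st.2.1 - 1
    (if pyGetCell st.1 nr st.2.2 ≠ some "F" then pySetCell st.1 nr st.2.2 symbol else st.1, nr, st.2.2)
  else if move == "R" then
    let nc := st.2.2 + 1
    (if pyGetCell st.1 st.2.1 nc ≠ some "F" then pySetCell st.1 st.2.1 nc symbol else st.1, st.2.1, nc)
  else if move == "L" then
    let nc := st.2.2 - 1
    (if pyGetCell st.1 st.2.1 nc ≠ some "F" then pySetCell st.1 st.2.1 nc symbol else st.1, st.2.1, nc)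
  else if move == "D" then
    let nr := st.2.1 + 1
    (if pyGetCell st.1 nr st.2.2 ≠ some "F" then pySetCell st.1 nr st.2.2 symbol else st.1, nr, st.2.2)
  else st

def move_node (maze : List (List String)) (moves : List String) (row : Int) (col : Int) (symbol : String) : Int × Int :=
  let st := moves.foldl (moveStepA symbol) (maze, row, col)
  (st.2.1, st.2.2)

-- ===== PORT B =====
def pvDeltas : PySem.Dict String (Int × Int) :=
  PySem.Dict.ofList [("U", (-1, 0)), ("R", (0, 1)), ("L", (0, -1)), ("D", (1, 0))]

-- trajectory pass: state = (current position, path so far)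
def trajStep (st : (Int × Int) × List (Int × Int)) (mv : String) : (Int × Int) × List (Int × Int) :=
  match PySem.Dict.get? pvDeltas mv with
  | some d => let p := (st.1.1 + d.1, st.1.2 + d.2); (p, st.2 ++ [p])
  | none => st

-- marking pass: maze[pr][pc] = symbol unless the cell is "F"
def markCell (symbol : String) (m : List (List String)) (p : Int × Int) : List (List String) :=
  if pyGetCell m p.1 p.2 ≠ some "F" then pySetCell m p.1 p.2 symbol else m

def move_node_alt (maze : List (List String)) (moves : List String) (row : Int) (col : Int) (symbol : String) : Int × Int :=
  let res := moves.foldl trajStep ((row, col), [])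
  let path := res.2
  let _marked := path.foldl (markCell symbol) maze
  match PySem.List.pyGet? path (-1) with
  | some p => p
  | none => (row, col)

-- ===== PRECONDITION & SPEC =====
-- position after the first k moves, by counting direction letters in the prefix
def prefixPos (moves : List String) (row col : Int) (k : Nat) : Int × Int :=
  ((row + ((moves.take k).count "D" : Int)) - ((moves.take k).count "U" : Int),
   (col + ((moves.take k).count "R" : Int)) - ((moves.take k).count "L" : Int))

-- Pre_ excludes exactly the inputs on which Python A raises IndexError: some step of the
-- move sequence lands on coordinates that do not index into the maze.
def Pre_move_node (maze : List (List String)) (moves : List String) (row : Int) (col : Int) (symbol : String) : Prop :=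
  ∀ k : Nat, k < moves.length → moves.getD k "" ∈ (["U", "R", "L", "D"] : List String) →
    (pyGetCell maze (prefixPos moves row col (k+1)).1 (prefixPos moves row col (k+1)).2).isSome = true
instance (maze : List (List String)) (moves : List String) (row : Int) (col : Int) (symbol : String) : Decidable (Pre_move_node maze moves row col symbol) := by unfold Pre_move_node; infer_instance

def pvWitness_move_node : List (List String) × List String × Int × Int × String :=
  ([[".", "F"], [".", "."]], ["D", "R", "U"], 0, 0, "*")

def Spec_move_node (maze : List (List String)) (moves : List String) (row : Int) (col : Int) (symbol : String) (out : Int × Int) : Prop := out = move_node_alt maze moves row col symbol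
instance (maze : List (List String)) (moves : List String) (row : Int) (col : Int) (symbol : String) (out : Int × Int) : Decidable (Spec_move_node maze moves row col symbol out) := by unfold Spec_move_node; infer_instance

-- ===== CLAIM (what is proved, stated in full; the proofs are below) =====
def Claim_equal_move_node : Prop := ∀ (maze : List (List String)) (moves : List String) (row : Int) (col : Int) (symbol : String), Dom_move_node maze moves row col symbol → Pre_move_node maze moves row col symbol → Spec_move_node maze moves row col symbol (move_node maze moves row col symbol)

-- ===== LEMMAS AND PROOFS =====
-- proof-only pure position step (no maze, no path)
def pstep (p : Int × Int) (mv : String) : Int × Int :=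
  if mv == "U" then (p.1 - 1, p.2)
  else if mv == "R" then (p.1, p.2 + 1)
  else if mv == "L" then (p.1, p.2 - 1)
  else if mv == "D" then (p.1 + 1, p.2)
  else p

theorem stepA_snd (symbol : String) (st : List (List String) × Int × Int) (mv : String) :
    (moveStepA symbol st mv).2 = pstep st.2 mv := by
  unfold moveStepA pstep
  split_ifs <;> rfl

theorem foldA_snd (symbol : String) (moves : List String) :
    ∀ (m : List (List String)) (r c : Int),
      (moves.foldl (moveStepA symbol) (m, r, c)).2 = moves.foldl pstep (r, c) := by
  induction moves with
  | nil => intro m r c; rfl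
  | cons mv rest ih =>
    intro m r c
    rcases h : moveStepA symbol (m, r, c) mv with ⟨m', r', c'⟩
    have h2 : (r', c') = pstep (r, c) mv := by
      have := stepA_snd symbol (m, r, c) mv
      rw [h] at this; exact this
    rw [List.foldl_cons, h, ih m' r' c', List.foldl_cons, ← h2]

theorem deltas_get (mv : String) :
    PySem.Dict.get? pvDeltas mv =
      (if mv == "U" then some ((-1 : Int), (0 : Int))
       else if mv == "R" then some (0, 1)
       else if mv == "L" then some (0, -1)
       else if mv == "D" then some (1, 0)
       else none) := by
  have h : pvDeltas = ((((PySem.Dict.empty.insert "U" ((-1 : Int), (0 : Int))).insert "R"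
      (0, 1)).insert "L" (0, -1)).insert "D" (1, 0)) := rfl
  rw [h]
  by_cases h1 : mv = "U"
  · subst h1; rfl
  by_cases h2 : mv = "R"
  · subst h2; rfl
  by_cases h3 : mv = "L"
  · subst h3; rfl
  by_cases h4 : mv = "D"
  · subst h4; rfl
  simp [PySem.Dict.get?_insert, PySem.Dict.get?_empty, h1, h2, h3, h4]

theorem traj_pstep (p : Int × Int) (path : List (Int × Int)) (mv : String) :
    (trajStep (p, path) mv).1 = pstep p mv ∧
    ((trajStep (p, path) mv).2 = path ++ [(trajStep (p, path) mv).1] ∨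
     ((trajStep (p, path) mv).2 = path ∧ (trajStep (p, path) mv).1 = p)) := by
  unfold trajStep pstep
  rw [deltas_get]
  split_ifs <;> simp [Prod.ext_iff] <;> omega

theorem trajRun (moves : List String) :
    ∀ (p : Int × Int) (path : List (Int × Int)),
      (moves.foldl trajStep (p, path)).1 = moves.foldl pstep p ∧
      ((moves.foldl trajStep (p, path)).2.getLast? = some (moves.foldl trajStep (p, path)).1 ∨
       ((moves.foldl trajStep (p, path)).2 = path ∧ (moves.foldl trajStep (p, path)).1 = p)) := by
  induction moves with
  | nil => intro p path; exact ⟨rfl, Or.inr ⟨rfl, rfl⟩⟩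
  | cons mv rest ih =>
    intro p path
    rw [List.foldl_cons, List.foldl_cons]
    obtain ⟨h1, h2⟩ := traj_pstep p path mv
    rcases hq : trajStep (p, path) mv with ⟨p', path'⟩
    rw [hq] at h1 h2
    simp only at h1 h2
    obtain ⟨g1, g2⟩ := ih p' path'
    refine ⟨by rw [g1, h1], ?_⟩
    rcases g2 with hlast | ⟨hs1, hs2⟩
    · exact Or.inl hlast
    · rcases h2 with happ | ⟨hk1, hk2⟩
      · left; rw [hs1, hs2, happ]; simp
      · right; exact ⟨by rw [hs1, hk1], by rw [hs2, hk2]⟩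

-- ===== VERDICT (by name: the statement is the Claim_ definition above) =====
theorem move_node_spec : Claim_equal_move_node := by
  intro maze moves row col symbol _ _
  simp only [Spec_move_node, move_node, move_node_alt]
  have hA := foldA_snd symbol moves maze row col
  obtain ⟨g1, g2⟩ := trajRun moves (row, col) []
  simp only [PySem.List.pyGet?_neg_one]
  rcases g2 with hl | ⟨hnil, hp⟩
  · rw [hl]
    exact hA.trans g1.symm
  · rw [hnil]
    simp only [List.getLast?_nil]
    exact hA.trans (g1.symm.trans hp)
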